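-- pv_equiv track=rewrite | github.com/pcopu/coco | src/coco/app_cli.py | _extract_topic_flags
-- ===== SOURCE A (Python) =====
-- def _parse_int_flag(raw: str, *, flag_name: str) -> int:
--     try:
--         return int(raw)
--     except (TypeError, ValueError) as exc:
--         raise RuntimeError(f"Invalid value for {flag_name}: {raw}") from exc
--
-- def _extract_topic_flags(argv: list[str]) -> tuple[list[str], int | None, int | None, int | None]:
--     remaining: list[str] = []
--     user_id: int | None = None
--     chat_id: int | None = None
--     thread_id: int | None = None
--     idx = 0
--     while idx < len(argv):
--         token = argv[idx]
--         if token == "--user-id":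
--             idx += 1
--             if idx >= len(argv):
--                 raise RuntimeError("Missing value for --user-id")
--             user_id = _parse_int_flag(argv[idx], flag_name="--user-id")
--         elif token.startswith("--user-id="):
--             user_id = _parse_int_flag(token.partition("=")[2], flag_name="--user-id")
--         elif token == "--chat-id":
--             idx += 1
--             if idx >= len(argv):
--                 raise RuntimeError("Missing value for --chat-id")
--             chat_id = _parse_int_flag(argv[idx], flag_name="--chat-id")
--         elif token.startswith("--chat-id="):
--             chat_id = _parse_int_flag(token.partition("=")[2], flag_name="--chat-id")
--         elif token == "--thread-id":
--             idx += 1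
--             if idx >= len(argv):
--                 raise RuntimeError("Missing value for --thread-id")
--             thread_id = _parse_int_flag(argv[idx], flag_name="--thread-id")
--         elif token.startswith("--thread-id="):
--             thread_id = _parse_int_flag(token.partition("=")[2], flag_name="--thread-id")
--         else:
--             remaining.append(token)
--         idx += 1
--     return remaining, user_id, chat_id, thread_id
-- ===== SOURCE B (Python) =====
-- _FLAGS = ("--user-id", "--chat-id", "--thread-id")
--
-- def _parse_int_flag(raw, *, flag_name):
--     try:
--         return int(raw)
--     except (TypeError, ValueError) as exc:
--         raise RuntimeError(f"Invalid value for {flag_name}: {raw}") from exc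
--
-- def _extract_topic_flags(argv):
--     slots = {}
--     remaining = []
--     rest = list(argv)
--     while rest:
--         token = rest.pop(0)
--         head, sep, tail = token.partition("=")
--         if sep and head in _FLAGS:
--             slots[head] = _parse_int_flag(tail, flag_name=head)
--         elif token in _FLAGS:
--             if not rest:
--                 raise RuntimeError(f"Missing value for {token}")
--             slots[token] = _parse_int_flag(rest.pop(0), flag_name=token)
--         else:
--             remaining.append(token)
--     return remaining, slots.get("--user-id"), slots.get("--chat-id"), slots.get("--thread-id")
-- ===== Notes on version B (the rewrite author's own statement) =====
-- stated objective: simpler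
-- what changed: Replaces A's six-branch per-flag if/elif chain by a flag table: one partition('=') per token decides the '--flag=value' form for all flags at once, a dict keyed by flag name stores the values (last wins), read back in fixed order at the end.
import Mathlib
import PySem

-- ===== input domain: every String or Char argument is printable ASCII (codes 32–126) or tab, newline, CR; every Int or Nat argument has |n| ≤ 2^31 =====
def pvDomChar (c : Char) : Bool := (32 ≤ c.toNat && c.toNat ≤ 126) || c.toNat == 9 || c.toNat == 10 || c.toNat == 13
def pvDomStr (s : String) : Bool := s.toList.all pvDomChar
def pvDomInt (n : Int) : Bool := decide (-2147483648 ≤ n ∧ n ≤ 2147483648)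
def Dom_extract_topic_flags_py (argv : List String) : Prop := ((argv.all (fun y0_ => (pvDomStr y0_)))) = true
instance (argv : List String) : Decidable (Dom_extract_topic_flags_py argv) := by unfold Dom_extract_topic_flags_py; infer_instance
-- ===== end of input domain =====

-- B replaces A's six-branch per-flag if/elif chain by a flag table: one partition("=") per
-- token decides the '--flag=value' form for all flags at once, a dict keyed by the flag name
-- stores the values (last wins), read back in fixed order at the end. Objective: simpler.

-- token.partition("=") for the single-character separator '=': (head, found?, tail);
-- exact: splits at the FIRST '=' , found? = false ↔ no '=' (then head = s, tail = []).
def pvPartEq : List Char → List Char × Bool × List Char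
  | [] => ([], false, [])
  | c :: cs =>
    if c = '=' then ([], true, cs)
    else
      let r := pvPartEq cs
      (c :: r.1, r.2.1, r.2.2)

-- ===== PORT A =====
-- _parse_int_flag: int(raw), RuntimeError (= none) if not parseable
def pvParseA (raw : String) : Option Int := PySem.Int.ofStr? raw

-- A's while-idx loop as structural recursion on the unread suffix; the RuntimeError
-- exits (missing value / unparsable int) return ([], none, none, none) — excluded by Pre_.
def pvGoA (l : List String) (rem : List String) (u c t : Option Int) :
    List String × Option Int × Option Int × Option Int :=
  match l with
  | [] => (rem, u, c, t)
  | token :: rest =>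
    if token = "--user-id" then
      match rest with
      | [] => ([], none, none, none)
      | v :: rest' =>
        match pvParseA v with
        | some n => pvGoA rest' rem (some n) c t
        | none => ([], none, none, none)
    else if PySem.Str.startswith token "--user-id=" then
      match pvParseA (String.ofList (pvPartEq token.toList).2.2) with
      | some n => pvGoA rest rem (some n) c t
      | none => ([], none, none, none)
    else if token = "--chat-id" then
      match rest with
      | [] => ([], none, none, none)
      | v :: rest' =>
        match pvParseA v with
        | some n => pvGoA rest' rem u (some n) t
        | none => ([], none, none, none)
    else if PySem.Str.startswith token "--chat-id=" then
      match pvParseA (String.ofList (pvPartEq token.toList).2.2) with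
      | some n => pvGoA rest rem u (some n) t
      | none => ([], none, none, none)
    else if token = "--thread-id" then
      match rest with
      | [] => ([], none, none, none)
      | v :: rest' =>
        match pvParseA v with
        | some n => pvGoA rest' rem u c (some n)
        | none => ([], none, none, none)
    else if PySem.Str.startswith token "--thread-id=" then
      match pvParseA (String.ofList (pvPartEq token.toList).2.2) with
      | some n => pvGoA rest rem u c (some n)
      | none => ([], none, none, none)
    else pvGoA rest (rem ++ [token]) u c t

def extract_topic_flags_py (argv : List String) : List String × Option Int × Option Int × Option Int :=
  pvGoA argv [] none none none

-- ===== PORT B =====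
def pvFlags : List String := ["--user-id", "--chat-id", "--thread-id"]

-- Source B's while rest: pop(0) loop: partition first, table lookup, dict of slots.
def pvGoB (l : List String) (rem : List String) (slots : PySem.Dict String Int) :
    List String × Option Int × Option Int × Option Int :=
  match l with
  | [] => (rem, slots.get? "--user-id", slots.get? "--chat-id", slots.get? "--thread-id")
  | token :: rest =>
    if (pvPartEq token.toList).2.1 && pvFlags.contains (String.ofList (pvPartEq token.toList).1) then
      match PySem.Int.ofStr? (String.ofList (pvPartEq token.toList).2.2) with
      | some n => pvGoB rest rem (slots.insert (String.ofList (pvPartEq token.toList).1) n)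
      | none => ([], none, none, none)
    else if pvFlags.contains token then
      match rest with
      | [] => ([], none, none, none)
      | v :: rest' =>
        match PySem.Int.ofStr? v with
        | some n => pvGoB rest' rem (slots.insert token n)
        | none => ([], none, none, none)
    else pvGoB rest (rem ++ [token]) slots

def extract_topic_flags_py_alt (argv : List String) : List String × Option Int × Option Int × Option Int :=
  pvGoB argv [] PySem.Dict.empty

-- ===== PRECONDITION & SPEC =====
-- Pre_ excludes exactly the inputs on which A raises RuntimeError (missing or
-- un-parsable flag value).  Closed form: the maximal run of consecutive bare-flag
-- tokens immediately before position i (length k, unique) makes i a *value* position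
-- if k is odd and an ordinary position if k is even; every value must be
-- int()-parsable, a bare flag in an ordinary position must not be last, and a
-- '--flag=v' token in an ordinary position must have int()-parsable v.
-- 'the k tokens argv[i-1], …, argv[i-k] are all bare flags, and the run stops there'
-- (k is then the length of the maximal bare-flag run before position i, which is unique)
def pvRunBefore (argv : List String) (i k : Nat) : Bool :=
  ((List.range k).all fun j => pvFlags.contains (argv.getD (i - 1 - j) "")) &&
    (k == i || !(pvFlags.contains (argv.getD (i - k - 1) "")))

def Pre_extract_topic_flags_py (argv : List String) : Prop :=
  ((List.range argv.length).all fun i =>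
    (List.range (i + 1)).all fun k =>
      !(pvRunBefore argv i k) ||
        (if k % 2 = 1 then
          (PySem.Int.ofStr? (argv.getD i "")).isSome
        else if pvFlags.contains (argv.getD i "") then
          decide (i + 1 < argv.length)
        else
          !((pvPartEq (argv.getD i "").toList).2.1 &&
              pvFlags.contains (String.ofList (pvPartEq (argv.getD i "").toList).1)) ||
            (PySem.Int.ofStr? (String.ofList (pvPartEq (argv.getD i "").toList).2.2)).isSome)) = true
instance (argv : List String) : Decidable (Pre_extract_topic_flags_py argv) := by
  unfold Pre_extract_topic_flags_py; infer_instance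

def pvWitness_extract_topic_flags_py : List String :=
  ["run", "--user-id", "7", "--chat-id=-5", "x", "--user-id=42"]

def Spec_extract_topic_flags_py (argv : List String) (out : List String × Option Int × Option Int × Option Int) : Prop := out = extract_topic_flags_py_alt argv
instance (argv : List String) (out : List String × Option Int × Option Int × Option Int) : Decidable (Spec_extract_topic_flags_py argv out) := by unfold Spec_extract_topic_flags_py; infer_instance

-- ===== CLAIM (what is proved, stated in full; the proofs are below) =====
def Claim_equal_extract_topic_flags_py : Prop := ∀ (argv : List String), Dom_extract_topic_flags_py argv → Pre_extract_topic_flags_py argv → Spec_extract_topic_flags_py argv (extract_topic_flags_py argv)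

-- ===== LEMMAS AND PROOFS =====

-- If the separator was found, the string decomposes as head ++ '=' :: tail.
theorem pvPartEq_found (s : List Char) (h : (pvPartEq s).2.1 = true) :
    s = (pvPartEq s).1 ++ '=' :: (pvPartEq s).2.2 := by
  induction s with
  | nil => simp [pvPartEq] at h
  | cons c cs ih =>
    by_cases hc : c = '='
    · simp [pvPartEq, hc]
    · simp only [pvPartEq, if_neg hc] at h ⊢
      simpa using ih h

-- partition at the first '=' of F ++ '=' :: r when F has no '='.
theorem pvPartEq_append (F r : List Char) (hF : '=' ∉ F) :
    pvPartEq (F ++ '=' :: r) = (F, true, r) := by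
  induction F with
  | nil => simp [pvPartEq]
  | cons c cs ih =>
    simp only [List.mem_cons, not_or] at hF
    have hc : ¬ c = '=' := fun h => hF.1 h.symm
    simp [pvPartEq, hc, ih hF.2]

-- startswith as a prefix statement (unfolds PySem.Chars.startswith)
theorem pv_sw_prefix (s p : List Char) : PySem.Chars.startswith s p = true ↔ p <+: s := by
  simp [PySem.Chars.startswith]

-- Bridge between A's startswith test and B's partition test, for a flag F with no '='.
theorem startswith_iff_part (s F : List Char) (hF : '=' ∉ F) :
    PySem.Chars.startswith s (F ++ ['=']) = true ↔
      (pvPartEq s).2.1 = true ∧ (pvPartEq s).1 = F := by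
  constructor
  · intro h
    rcases (pv_sw_prefix s _).mp h with ⟨r, hr⟩
    subst hr
    rw [List.append_assoc]
    simp [pvPartEq_append F r hF]
  · rintro ⟨hf, hh⟩
    have hs := pvPartEq_found s hf
    rw [hh] at hs
    rw [hs]
    exact (pv_sw_prefix _ _).mpr ⟨(pvPartEq s).2.2, by rw [List.append_assoc, List.singleton_append]⟩

theorem ne_eq_user : ('=' : Char) ∉ "--user-id".toList := by decide
theorem ne_eq_chat : ('=' : Char) ∉ "--chat-id".toList := by decide
theorem ne_eq_thread : ('=' : Char) ∉ "--thread-id".toList := by decide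

-- Str-level form of the bridge, specialised to the three flags.
theorem sw_user (s : String) :
    PySem.Str.startswith s "--user-id=" = true ↔
      (pvPartEq s.toList).2.1 = true ∧ String.ofList (pvPartEq s.toList).1 = "--user-id" := by
  have h0 : ("--user-id=" : String).toList = "--user-id".toList ++ ['='] := by decide
  rw [show PySem.Str.startswith s "--user-id=" = PySem.Chars.startswith s.toList ("--user-id=").toList from by simp,
    h0, startswith_iff_part s.toList _ ne_eq_user]
  constructor
  · rintro ⟨h1, h2⟩; exact ⟨h1, by rw [h2]; decide⟩
  · rintro ⟨h1, h2⟩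
    refine ⟨h1, ?_⟩
    have := congrArg String.toList h2
    simpa using this

theorem sw_chat (s : String) :
    PySem.Str.startswith s "--chat-id=" = true ↔
      (pvPartEq s.toList).2.1 = true ∧ String.ofList (pvPartEq s.toList).1 = "--chat-id" := by
  have h0 : ("--chat-id=" : String).toList = "--chat-id".toList ++ ['='] := by decide
  rw [show PySem.Str.startswith s "--chat-id=" = PySem.Chars.startswith s.toList ("--chat-id=").toList from by simp,
    h0, startswith_iff_part s.toList _ ne_eq_chat]
  constructor
  · rintro ⟨h1, h2⟩; exact ⟨h1, by rw [h2]; decide⟩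
  · rintro ⟨h1, h2⟩
    refine ⟨h1, ?_⟩
    have := congrArg String.toList h2
    simpa using this

theorem sw_thread (s : String) :
    PySem.Str.startswith s "--thread-id=" = true ↔
      (pvPartEq s.toList).2.1 = true ∧ String.ofList (pvPartEq s.toList).1 = "--thread-id" := by
  have h0 : ("--thread-id=" : String).toList = "--thread-id".toList ++ ['='] := by decide
  rw [show PySem.Str.startswith s "--thread-id=" = PySem.Chars.startswith s.toList ("--thread-id=").toList from by simp,
    h0, startswith_iff_part s.toList _ ne_eq_thread]
  constructor
  · rintro ⟨h1, h2⟩; exact ⟨h1, by rw [h2]; decide⟩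
  · rintro ⟨h1, h2⟩
    refine ⟨h1, ?_⟩
    have := congrArg String.toList h2
    simpa using this

-- Main loop invariant, by strong induction on the length of the unread suffix
-- (A consumes two tokens for a bare flag): A's three slot variables are B's dict
-- looked up at the three flags.
theorem go_eq (n : Nat) : ∀ (l : List String), l.length ≤ n →
    ∀ (rem : List String) (slots : PySem.Dict String Int),
    pvGoA l rem (slots.get? "--user-id") (slots.get? "--chat-id") (slots.get? "--thread-id") =
      pvGoB l rem slots := by
  induction n with
  | zero =>
    intro l hl
    cases l with
    | nil => exact fun rem slots => rfl
    | cons a b => exact absurd hl (by simp)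
  | succ n ih =>
    intro l hl
    cases l with
    | nil => exact fun rem slots => rfl
    | cons token rest =>
      intro rem slots
      have hrest : rest.length ≤ n := by simp at hl; omega
      by_cases hu : token = "--user-id"
      · subst hu
        cases rest with
        | nil => rfl
        | cons v rest' =>
          have hrest' : rest'.length ≤ n := by simp at hrest; omega
          unfold pvGoA pvGoB pvParseA
          rw [if_pos rfl, if_neg (by decide), if_pos (by decide : pvFlags.contains "--user-id" = true)]
          show (match PySem.Int.ofStr? v with
                | some n => pvGoA rest' rem (some n) (slots.get? "--chat-id") (slots.get? "--thread-id")
                | none => ([], none, none, none)) =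
              (match PySem.Int.ofStr? v with
                | some n => pvGoB rest' rem (slots.insert "--user-id" n)
                | none => ([], none, none, none))
          cases hv : PySem.Int.ofStr? v with
          | none => rfl
          | some m =>
            have h := ih rest' hrest' rem (slots.insert "--user-id" m)
            simp only [PySem.Dict.get?_insert, String.reduceEq, reduceIte] at h
            exact h
      · by_cases hsu : PySem.Str.startswith token "--user-id=" = true
        · obtain ⟨hf, hh⟩ := (sw_user token).mp hsu
          unfold pvGoA pvGoB pvParseA
          rw [if_neg hu, if_pos hsu,
            if_pos (show ((pvPartEq token.toList).2.1 &&
              pvFlags.contains (String.ofList (pvPartEq token.toList).1)) = true by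
                rw [hf, hh]; decide)]
          rw [hh]
          cases hv : PySem.Int.ofStr? (String.ofList (pvPartEq token.toList).2.2) with
          | none => rfl
          | some m =>
            have h := ih rest hrest rem (slots.insert "--user-id" m)
            simp only [PySem.Dict.get?_insert, String.reduceEq, reduceIte] at h
            exact h
        · by_cases hc : token = "--chat-id"
          · subst hc
            cases rest with
            | nil => rfl
            | cons v rest' =>
              have hrest' : rest'.length ≤ n := by simp at hrest; omega
              unfold pvGoA pvGoB pvParseA
              rw [if_neg (by decide : ¬ ("--chat-id" : String) = "--user-id"), if_neg hsu,
                if_pos rfl, if_neg (by decide),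
                if_pos (by decide : pvFlags.contains "--chat-id" = true)]
              show (match PySem.Int.ofStr? v with
                  | some n => pvGoA rest' rem (slots.get? "--user-id") (some n) (slots.get? "--thread-id")
                  | none => ([], none, none, none)) =
                (match PySem.Int.ofStr? v with
                  | some n => pvGoB rest' rem (slots.insert "--chat-id" n)
                  | none => ([], none, none, none))
              cases hv : PySem.Int.ofStr? v with
              | none => rfl
              | some m =>
                have h := ih rest' hrest' rem (slots.insert "--chat-id" m)
                simp only [PySem.Dict.get?_insert, String.reduceEq, reduceIte] at h
                exact h
          · by_cases hsc : PySem.Str.startswith token "--chat-id=" = true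
            · obtain ⟨hf, hh⟩ := (sw_chat token).mp hsc
              unfold pvGoA pvGoB pvParseA
              rw [if_neg hu, if_neg hsu, if_neg hc, if_pos hsc,
                if_pos (show ((pvPartEq token.toList).2.1 &&
                  pvFlags.contains (String.ofList (pvPartEq token.toList).1)) = true by
                    rw [hf, hh]; decide)]
              rw [hh]
              cases hv : PySem.Int.ofStr? (String.ofList (pvPartEq token.toList).2.2) with
              | none => rfl
              | some m =>
                have h := ih rest hrest rem (slots.insert "--chat-id" m)
                simp only [PySem.Dict.get?_insert, String.reduceEq, reduceIte] at h
                exact h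
            · by_cases ht : token = "--thread-id"
              · subst ht
                cases rest with
                | nil => rfl
                | cons v rest' =>
                  have hrest' : rest'.length ≤ n := by simp at hrest; omega
                  unfold pvGoA pvGoB pvParseA
                  rw [if_neg (by decide : ¬ ("--thread-id" : String) = "--user-id"), if_neg hsu,
                    if_neg (by decide : ¬ ("--thread-id" : String) = "--chat-id"), if_neg hsc,
                    if_pos rfl, if_neg (by decide),
                    if_pos (by decide : pvFlags.contains "--thread-id" = true)]
                  show (match PySem.Int.ofStr? v with
                      | some n => pvGoA rest' rem (slots.get? "--user-id") (slots.get? "--chat-id") (some n)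
                      | none => ([], none, none, none)) =
                    (match PySem.Int.ofStr? v with
                      | some n => pvGoB rest' rem (slots.insert "--thread-id" n)
                      | none => ([], none, none, none))
                  cases hv : PySem.Int.ofStr? v with
                  | none => rfl
                  | some m =>
                    have h := ih rest' hrest' rem (slots.insert "--thread-id" m)
                    simp only [PySem.Dict.get?_insert, String.reduceEq, reduceIte] at h
                    exact h
              · by_cases hst : PySem.Str.startswith token "--thread-id=" = true
                · obtain ⟨hf, hh⟩ := (sw_thread token).mp hst
                  unfold pvGoA pvGoB pvParseA
                  rw [if_neg hu, if_neg hsu, if_neg hc, if_neg hsc, if_neg ht, if_pos hst,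
                    if_pos (show ((pvPartEq token.toList).2.1 &&
                      pvFlags.contains (String.ofList (pvPartEq token.toList).1)) = true by
                        rw [hf, hh]; decide)]
                  rw [hh]
                  cases hv : PySem.Int.ofStr? (String.ofList (pvPartEq token.toList).2.2) with
                  | none => rfl
                  | some m =>
                    have h := ih rest hrest rem (slots.insert "--thread-id" m)
                    simp only [PySem.Dict.get?_insert, String.reduceEq, reduceIte] at h
                    exact h
                · -- plain token: goes to `remaining` on both sides
                  have hBf : ¬ ((pvPartEq token.toList).2.1 &&
                      pvFlags.contains (String.ofList (pvPartEq token.toList).1)) = true := by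
                    intro hcon
                    rw [Bool.and_eq_true] at hcon
                    have hmem : String.ofList (pvPartEq token.toList).1 = "--user-id" ∨
                        String.ofList (pvPartEq token.toList).1 = "--chat-id" ∨
                        String.ofList (pvPartEq token.toList).1 = "--thread-id" := by
                      have h2 := hcon.2
                      simpa only [pvFlags, List.contains_cons, List.contains_nil,
                        Bool.or_eq_true, beq_iff_eq, Bool.false_eq_true, or_false] using h2
                    rcases hmem with h | h | h
                    · exact hsu ((sw_user token).mpr ⟨hcon.1, h⟩)
                    · exact hsc ((sw_chat token).mpr ⟨hcon.1, h⟩)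
                    · exact hst ((sw_thread token).mpr ⟨hcon.1, h⟩)
                  have hBc : ¬ pvFlags.contains token = true := by
                    simp only [pvFlags, List.contains_cons, List.contains_nil,
                      Bool.or_eq_true, beq_iff_eq]
                    simp [hu, hc, ht]
                  unfold pvGoA pvGoB
                  rw [if_neg hu, if_neg hsu, if_neg hc, if_neg hsc, if_neg ht, if_neg hst,
                    if_neg hBf, if_neg hBc]
                  exact ih rest hrest (rem ++ [token]) slots

-- ===== VERDICT (by name: the statement is the Claim_ definition above) =====
theorem extract_topic_flags_py_spec : Claim_equal_extract_topic_flags_py := by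
  intro argv _ _
  unfold Spec_extract_topic_flags_py extract_topic_flags_py extract_topic_flags_py_alt
  exact (go_eq argv.length argv le_rfl [] PySem.Dict.empty).symm ▸ rfl
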